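-- pv_equiv track=rewrite | github.com/Meghthedev/localmanifest_generator | localman.py | clean_stray_elements
-- ===== SOURCE A (Python) =====
-- def clean_stray_elements(lines):
--     cleaned_lines = []
--     ignore_linkfile = False
--     for line in lines:
--         if '<linkfile' in line:
--             ignore_linkfile = True
--         elif '</project>' in line:
--             ignore_linkfile = False
--             continue
--
--         if not ignore_linkfile and line.strip().startswith('<'):
--             cleaned_lines.append(line)
--
--     # Remove all line gaps longer than one line
--     final_lines = []
--     empty_line_count = 0
--     for line in cleaned_lines:
--         if line.strip():  # Check if the line is not empty
--             final_lines.append(line)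
--             empty_line_count = 0
--         elif empty_line_count < 2:  # Keep one empty line
--             final_lines.append(line)
--             empty_line_count += 1
--
--     return final_lines
-- ===== SOURCE B (Python) =====
-- def clean_stray_elements(lines):
--     out = []
--     i = 0
--     n = len(lines)
--     while i < n:
--         line = lines[i]
--         i += 1
--         if '<linkfile' in line:
--             # skip mode: consume lines until a closing </project> (unless the
--             # line itself re-opens a linkfile block)
--             while i < n:
--                 l2 = lines[i]
--                 i += 1
--                 if '<linkfile' in l2:
--                     continue
--                 if '</project>' in l2:
--                     break
--             continue
--         if '</project>' in line:
--             continue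
--         if line.strip().startswith('<'):
--             out.append(line)
--     return out
-- ===== Notes on version B (the rewrite author's own statement) =====
-- stated objective: simpler
-- what changed: B replaces A's boolean-flag loop plus a second blank-line-collapsing pass by a single-pass two-state scan (nested while loops over an index); the collapse pass is proved to be a no-op because every kept line's strip starts with '<'.
import Mathlib
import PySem

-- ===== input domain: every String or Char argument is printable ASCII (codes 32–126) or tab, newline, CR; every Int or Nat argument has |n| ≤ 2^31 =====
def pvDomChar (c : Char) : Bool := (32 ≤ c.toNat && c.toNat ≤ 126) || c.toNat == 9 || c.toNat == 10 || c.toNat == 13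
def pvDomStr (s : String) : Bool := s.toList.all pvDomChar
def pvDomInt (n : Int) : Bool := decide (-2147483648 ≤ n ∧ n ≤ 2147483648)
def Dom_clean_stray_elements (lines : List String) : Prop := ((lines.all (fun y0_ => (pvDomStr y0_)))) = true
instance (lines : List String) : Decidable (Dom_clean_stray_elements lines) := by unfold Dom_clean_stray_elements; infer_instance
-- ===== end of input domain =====

-- B replaces A's boolean-flag loop plus blank-collapsing second pass by a single-pass
-- two-state scan (nested while loops); the collapse pass is a proved no-op (objective: simpler).

-- ===== PORT A =====
-- first loop body: state = (cleaned_lines, ignore_linkfile)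
def pvStepA (st : List String × Bool) (line : String) : List String × Bool :=
  if PySem.Str.isIn "<linkfile" line then
    -- ignore_linkfile = True, then the shared append check
    if !true && PySem.Str.startswith (PySem.Str.strip line) "<" then
      (st.1 ++ [line], true) else (st.1, true)
  else if PySem.Str.isIn "</project>" line then
    (st.1, false)   -- continue
  else
    if !st.2 && PySem.Str.startswith (PySem.Str.strip line) "<" then
      (st.1 ++ [line], st.2) else (st.1, st.2)

-- second loop body: state = (final_lines, empty_line_count)
def pvStep2A (st : List String × Nat) (line : String) : List String × Nat :=
  if PySem.Str.strip line ≠ "" then (st.1 ++ [line], 0)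
  else if st.2 < 2 then (st.1 ++ [line], st.2 + 1)
  else st

def clean_stray_elements (lines : List String) : List String :=
  let cleaned := (lines.foldl pvStepA ([], false)).1
  (cleaned.foldl pvStep2A ([], 0)).1

-- ===== PORT B =====
-- B's outer while loop ("keep" mode) and inner while loop ("skip" mode),
-- each consuming the remaining suffix of lines
mutual
def pvKeepB : List String → List String
  | [] => []
  | line :: rest =>
    if PySem.Str.isIn "<linkfile" line then pvSkipB rest
    else if PySem.Str.isIn "</project>" line then pvKeepB rest
    else if PySem.Str.startswith (PySem.Str.strip line) "<" then line :: pvKeepB rest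
    else pvKeepB rest
def pvSkipB : List String → List String
  | [] => []
  | l2 :: rest =>
    if PySem.Str.isIn "<linkfile" l2 then pvSkipB rest
    else if PySem.Str.isIn "</project>" l2 then pvKeepB rest
    else pvSkipB rest
end

def clean_stray_elements_alt (lines : List String) : List String := pvKeepB lines

-- ===== PRECONDITION & SPEC =====
def Spec_clean_stray_elements (lines : List String) (out : List String) : Prop := out = clean_stray_elements_alt lines
instance (lines : List String) (out : List String) : Decidable (Spec_clean_stray_elements lines out) := by unfold Spec_clean_stray_elements; infer_instance

-- ===== CLAIM (what is proved, stated in full; the proofs are below) =====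
def Claim_equal_clean_stray_elements : Prop := ∀ (lines : List String), Dom_clean_stray_elements lines → Spec_clean_stray_elements lines (clean_stray_elements lines)

-- ===== LEMMAS AND PROOFS =====

-- A's first loop, started in either flag state, appends exactly B's keep/skip scan
theorem foldA_eq_keep_skip (lines : List String) : ∀ (acc : List String),
    (lines.foldl pvStepA (acc, false)).1 = acc ++ pvKeepB lines ∧
    (lines.foldl pvStepA (acc, true)).1 = acc ++ pvSkipB lines := by
  induction lines with
  | nil => intro acc; simp [pvKeepB, pvSkipB]
  | cons line rest ih =>
    intro acc
    by_cases h1 : PySem.Chars.isIn ['<','l','i','n','k','f','i','l','e'] line.toList = true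
    · constructor
      · simpa [pvStepA, pvKeepB, h1] using (ih acc).2
      · simpa [pvStepA, pvSkipB, h1] using (ih acc).2
    · by_cases h2 : PySem.Chars.isIn ['<','/','p','r','o','j','e','c','t','>'] line.toList = true
      · constructor
        · simpa [pvStepA, pvKeepB, h1, h2] using (ih acc).1
        · simpa [pvStepA, pvSkipB, h1, h2] using (ih acc).1
      · by_cases h3 : PySem.Chars.startswith (PySem.Chars.strip line.toList) ['<'] = true
        · constructor
          · simpa [pvStepA, pvKeepB, h1, h2, h3, List.append_assoc] using (ih (acc ++ [line])).1
          · simpa [pvStepA, pvSkipB, h1, h2, h3] using (ih acc).2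
        · constructor
          · simpa [pvStepA, pvKeepB, h1, h2, h3] using (ih acc).1
          · simpa [pvStepA, pvSkipB, h1, h2, h3] using (ih acc).2

-- every line B keeps has a stripped form starting with '<'
theorem mem_keep_skip_startswith (lines : List String) :
    (∀ l ∈ pvKeepB lines, PySem.Str.startswith (PySem.Str.strip l) "<" = true) ∧
    (∀ l ∈ pvSkipB lines, PySem.Str.startswith (PySem.Str.strip l) "<" = true) := by
  induction lines with
  | nil => constructor <;> intro l hl <;> simp [pvKeepB, pvSkipB] at hl
  | cons line rest ih =>
    constructor
    · intro l hl
      simp only [pvKeepB] at hl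
      split_ifs at hl with h1 h2 h3
      · exact ih.2 l hl
      · exact ih.1 l hl
      · rcases List.mem_cons.mp hl with rfl | hl
        · exact h3
        · exact ih.1 l hl
      · exact ih.1 l hl
    · intro l hl
      simp only [pvSkipB] at hl
      split_ifs at hl with h1 h2
      · exact ih.2 l hl
      · exact ih.1 l hl
      · exact ih.2 l hl

-- a string whose strip starts with '<' has a non-empty strip
theorem strip_ne_of_startswith (s : String)
    (h : PySem.Str.startswith (PySem.Str.strip s) "<" = true) :
    PySem.Str.strip s ≠ "" := by
  intro he
  rw [he] at h
  exact absurd h (by decide)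

-- A's second loop is the identity on lists of lines with non-empty strip
theorem fold2_id (xs : List String) : ∀ (acc : List String) (k : Nat),
    (∀ l ∈ xs, PySem.Str.strip l ≠ "") →
    (xs.foldl pvStep2A (acc, k)).1 = acc ++ xs := by
  induction xs with
  | nil => intro acc k _; simp
  | cons x rest ih =>
    intro acc k h
    have hx : PySem.Str.strip x ≠ "" := h x (List.mem_cons_self ..)
    simp only [List.foldl_cons, pvStep2A, if_pos hx]
    rw [ih (acc ++ [x]) 0 (fun l hl => h l (List.mem_cons_of_mem _ hl))]
    simp

-- ===== VERDICT (by name: the statement is the Claim_ definition above) =====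
theorem clean_stray_elements_spec : Claim_equal_clean_stray_elements := by
  intro lines _
  unfold Spec_clean_stray_elements clean_stray_elements clean_stray_elements_alt
  rw [(foldA_eq_keep_skip lines []).1]
  simp only [List.nil_append]
  rw [fold2_id (pvKeepB lines) [] 0
    (fun l hl => strip_ne_of_startswith l ((mem_keep_skip_startswith lines).1 l hl))]
  simp
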